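-- pv_equiv track=rewrite | github.com/Fikiri-Solutions/fikiri-solutions | core/onboarding_wizard.py | _generate_automation_suggestions
-- ===== SOURCE A (Python) =====
-- from typing import Dict, Any, Optional, List
--
-- def _generate_automation_suggestions(sync_stats: Dict[str, Any], top_contacts: List[Dict[str, Any]]) -> List[Dict[str, Any]]:
--     """Generate automation suggestions based on data"""
--     suggestions = []
--
--     # Email sequence suggestions
--     if sync_stats.get('total_contacts', 0) > 0:
--         suggestions.append({
--             'type': 'email_sequence',
--             'name': 'Welcome Series',
--             'description': 'Automated welcome emails for new contacts',
--             'priority': 'high',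
--             'estimated_impact': 'Increase engagement by 25%'
--         })
--
--     # Lead nurturing suggestions
--     if sync_stats.get('total_leads', 0) > 0:
--         suggestions.append({
--             'type': 'lead_nurturing',
--             'name': 'Lead Nurturing Campaign',
--             'description': 'Personalized follow-up sequences for high-value leads',
--             'priority': 'high',
--             'estimated_impact': 'Convert 15% more leads'
--         })
--
--     # Meeting follow-up suggestions
--     if any('meeting' in contact.get('name', '').lower() or 'meeting' in contact.get('company', '').lower() for contact in top_contacts):
--         suggestions.append({
--             'type': 'follow_up',
--             'name': 'Meeting Follow-up',
--             'description': 'Automated follow-up after meetings',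
--             'priority': 'medium',
--             'estimated_impact': 'Improve meeting outcomes by 30%'
--         })
--
--     # CRM integration suggestions
--     if sync_stats.get('total_contacts', 0) > 10:
--         suggestions.append({
--             'type': 'crm_integration',
--             'name': 'CRM Sync',
--             'description': 'Sync contacts with your CRM system',
--             'priority': 'medium',
--             'estimated_impact': 'Streamline contact management'
--         })
--
--     return suggestions
-- ===== SOURCE B (Python) =====
-- from typing import Dict, Any, List
--
-- # Master catalog of every suggestion the wizard knows, in display order.
-- _CATALOG = [
--     {'type': 'email_sequence', 'name': 'Welcome Series',
--      'description': 'Automated welcome emails for new contacts',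
--      'priority': 'high', 'estimated_impact': 'Increase engagement by 25%'},
--     {'type': 'lead_nurturing', 'name': 'Lead Nurturing Campaign',
--      'description': 'Personalized follow-up sequences for high-value leads',
--      'priority': 'high', 'estimated_impact': 'Convert 15% more leads'},
--     {'type': 'follow_up', 'name': 'Meeting Follow-up',
--      'description': 'Automated follow-up after meetings',
--      'priority': 'medium', 'estimated_impact': 'Improve meeting outcomes by 30%'},
--     {'type': 'crm_integration', 'name': 'CRM Sync',
--      'description': 'Sync contacts with your CRM system',
--      'priority': 'medium', 'estimated_impact': 'Streamline contact management'},
-- ]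
--
-- def _mentions_meeting(contacts: List[Dict[str, Any]]) -> bool:
--     """Recursively scan contacts for 'meeting' in name or company."""
--     if not contacts:
--         return False
--     c = contacts[0]
--     if 'meeting' in c.get('name', '').lower() or 'meeting' in c.get('company', '').lower():
--         return True
--     return _mentions_meeting(contacts[1:])
--
-- def _active_types(sync_stats: Dict[str, Any], top_contacts: List[Dict[str, Any]]) -> set:
--     """Stage 1: decide WHICH suggestion types apply, as a set of type keys."""
--     active = set()
--     contacts = sync_stats.get('total_contacts', 0)
--     if contacts > 0:
--         active.add('email_sequence')
--     if sync_stats.get('total_leads', 0) > 0: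
--         active.add('lead_nurturing')
--     if _mentions_meeting(top_contacts):
--         active.add('follow_up')
--     if contacts > 10:
--         active.add('crm_integration')
--     return active
--
-- def _generate_automation_suggestions(sync_stats: Dict[str, Any], top_contacts: List[Dict[str, Any]]) -> List[Dict[str, Any]]:
--     """Stage 2: filter the master catalog by the active type set."""
--     active = _active_types(sync_stats, top_contacts)
--     return [dict(s) for s in _CATALOG if s['type'] in active]
-- ===== Notes on version B (the rewrite author's own statement) =====
-- stated objective: alternative
-- what changed: B first computes a set of active suggestion-type keys (with a recursive meeting scan and one shared total_contacts read), then produces the output in a second pass by filtering a master catalog of all suggestions by set membership, instead of A's single pass of four inline if-append branches.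
import Mathlib
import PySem

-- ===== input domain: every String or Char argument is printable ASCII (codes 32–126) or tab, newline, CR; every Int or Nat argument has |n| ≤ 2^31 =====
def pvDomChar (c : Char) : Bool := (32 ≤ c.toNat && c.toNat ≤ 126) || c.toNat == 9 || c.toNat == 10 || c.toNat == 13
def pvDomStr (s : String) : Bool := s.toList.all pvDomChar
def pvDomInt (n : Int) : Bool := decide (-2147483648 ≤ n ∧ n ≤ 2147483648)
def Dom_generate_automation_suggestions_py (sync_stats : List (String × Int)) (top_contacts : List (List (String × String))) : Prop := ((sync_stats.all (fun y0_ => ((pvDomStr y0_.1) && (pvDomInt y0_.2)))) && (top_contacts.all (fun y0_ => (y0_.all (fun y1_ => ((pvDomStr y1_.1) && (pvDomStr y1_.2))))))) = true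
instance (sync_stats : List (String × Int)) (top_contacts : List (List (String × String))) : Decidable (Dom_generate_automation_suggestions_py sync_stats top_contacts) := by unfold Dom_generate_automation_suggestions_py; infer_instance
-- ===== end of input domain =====

-- B replaces A's single pass of four inline if-append branches with two stages:
-- first compute a set of active suggestion-type keys (recursive meeting scan,
-- one shared total_contacts read), then filter a master catalog by membership
-- in that set (objective: alternative decomposition, same cost).

-- ===== PORT A =====
-- the four literal suggestion dicts A appends
def pvSugWelcome : List (String × String) :=
  [("type", "email_sequence"), ("name", "Welcome Series"),
   ("description", "Automated welcome emails for new contacts"),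
   ("priority", "high"), ("estimated_impact", "Increase engagement by 25%")]
def pvSugNurture : List (String × String) :=
  [("type", "lead_nurturing"), ("name", "Lead Nurturing Campaign"),
   ("description", "Personalized follow-up sequences for high-value leads"),
   ("priority", "high"), ("estimated_impact", "Convert 15% more leads")]
def pvSugFollowup : List (String × String) :=
  [("type", "follow_up"), ("name", "Meeting Follow-up"),
   ("description", "Automated follow-up after meetings"),
   ("priority", "medium"), ("estimated_impact", "Improve meeting outcomes by 30%")]
def pvSugCrm : List (String × String) :=
  [("type", "crm_integration"), ("name", "CRM Sync"),
   ("description", "Sync contacts with your CRM system"),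
   ("priority", "medium"), ("estimated_impact", "Streamline contact management")]

def generate_automation_suggestions_py (sync_stats : List (String × Int)) (top_contacts : List (List (String × String))) : List (List (String × String)) :=
  let suggestions : List (List (String × String)) := []
  let suggestions := if (PySem.Dict.mk sync_stats).getD "total_contacts" 0 > 0 then suggestions ++ [pvSugWelcome] else suggestions
  let suggestions := if (PySem.Dict.mk sync_stats).getD "total_leads" 0 > 0 then suggestions ++ [pvSugNurture] else suggestions
  let suggestions := if top_contacts.any (fun contact =>
      PySem.Str.isIn "meeting" (PySem.Str.lower ((PySem.Dict.mk contact).getD "name" "")) ||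
      PySem.Str.isIn "meeting" (PySem.Str.lower ((PySem.Dict.mk contact).getD "company" "")))
    then suggestions ++ [pvSugFollowup] else suggestions
  let suggestions := if (PySem.Dict.mk sync_stats).getD "total_contacts" 0 > 10 then suggestions ++ [pvSugCrm] else suggestions
  suggestions

-- ===== PORT B =====
-- master catalog (Source B's _CATALOG), in display order
def pvCatalog : List (List (String × String)) := [pvSugWelcome, pvSugNurture, pvSugFollowup, pvSugCrm]

-- Source B's _mentions_meeting: recursive scan over the contacts list
def pvMentionsMeeting : List (List (String × String)) → Bool
  | [] => false
  | c :: rest =>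
      if PySem.Str.isIn "meeting" (PySem.Str.lower ((PySem.Dict.mk c).getD "name" "")) ||
         PySem.Str.isIn "meeting" (PySem.Str.lower ((PySem.Dict.mk c).getD "company" ""))
      then true
      else pvMentionsMeeting rest

-- Source B's _active_types: stage 1, the set of active type keys
def pvActiveTypes (sync_stats : List (String × Int)) (top_contacts : List (List (String × String))) : PySem.Set String :=
  let active : PySem.Set String := PySem.Set.empty
  let contacts := (PySem.Dict.mk sync_stats).getD "total_contacts" 0
  let active := if contacts > 0 then PySem.Set.add active "email_sequence" else active
  let active := if (PySem.Dict.mk sync_stats).getD "total_leads" 0 > 0 then PySem.Set.add active "lead_nurturing" else active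
  let active := if pvMentionsMeeting top_contacts then PySem.Set.add active "follow_up" else active
  let active := if contacts > 10 then PySem.Set.add active "crm_integration" else active
  active

def generate_automation_suggestions_py_alt (sync_stats : List (String × Int)) (top_contacts : List (List (String × String))) : List (List (String × String)) :=
  let active := pvActiveTypes sync_stats top_contacts
  -- s['type'] is a direct key access; every catalog entry carries the key, so the
  -- none branch is unreachable (ported by hand, exact on the catalog's entries)
  pvCatalog.filter (fun s =>
    match (PySem.Dict.mk s).get? "type" with
    | some t => PySem.Set.contains active t
    | none => false)

-- ===== PRECONDITION & SPEC =====
def Spec_generate_automation_suggestions_py (sync_stats : List (String × Int)) (top_contacts : List (List (String × String))) (out : List (List (String × String))) : Prop := out = generate_automation_suggestions_py_alt sync_stats top_contacts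
instance (sync_stats : List (String × Int)) (top_contacts : List (List (String × String))) (out : List (List (String × String))) : Decidable (Spec_generate_automation_suggestions_py sync_stats top_contacts out) := by unfold Spec_generate_automation_suggestions_py; infer_instance

-- ===== CLAIM =====
def Claim_equal_generate_automation_suggestions_py : Prop := ∀ (sync_stats : List (String × Int)) (top_contacts : List (List (String × String))), Dom_generate_automation_suggestions_py sync_stats top_contacts → Spec_generate_automation_suggestions_py sync_stats top_contacts (generate_automation_suggestions_py sync_stats top_contacts)

-- ===== LEMMAS AND PROOFS =====
-- B's recursive scan computes the same Bool as A's any()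
theorem pvMentionsMeeting_eq_any (tc : List (List (String × String))) :
    pvMentionsMeeting tc = tc.any (fun contact =>
      PySem.Str.isIn "meeting" (PySem.Str.lower ((PySem.Dict.mk contact).getD "name" "")) ||
      PySem.Str.isIn "meeting" (PySem.Str.lower ((PySem.Dict.mk contact).getD "company" ""))) := by
  induction tc with
  | nil => rfl
  | cons c rest ih =>
      simp only [pvMentionsMeeting, List.any_cons, ih]
      split_ifs with h
      · simp only [h, Bool.true_or]
      · simp only [Bool.not_eq_true] at h
        simp only [h, Bool.false_or]

-- ===== VERDICT =====
theorem generate_automation_suggestions_py_spec : Claim_equal_generate_automation_suggestions_py := by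
  intro ss tc _
  unfold Spec_generate_automation_suggestions_py generate_automation_suggestions_py
    generate_automation_suggestions_py_alt pvActiveTypes
  rw [pvMentionsMeeting_eq_any]
  dsimp only
  split_ifs <;> rfl
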